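-- pv_equiv track=rewrite | github.com/bar-ang/ProjectEulerSolutions | oldfiles/pe78.py | p_recursive
-- ===== SOURCE A (Python) =====
-- def p_recursive(n, k=None):
--     if not k or k > n:
--         k = n
--     assert n >= 0 and k >= 0
--     if k <= 1:
--         return 1
--     if n <= 1:
--         return n
--     return p_recursive(n, k//2) + p_recursive(n-k//2, k-(k//2))
-- ===== SOURCE B (Python) =====
-- def p_recursive(n, k=None):
--     # Closed form: the recursion just counts back up to the (normalized) k.
--     kk = n if not k or k > n else k
--     assert n >= 0 and kk >= 0
--     return 1 if kk <= 1 else kk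
-- ===== Notes on version B (the rewrite author's own statement) =====
-- stated objective: faster
-- what changed: Replaced the binary-splitting recursion (which just re-sums to the normalized k) by the closed form: normalize k, return 1 if it is <= 1 else k.
import Mathlib
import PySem

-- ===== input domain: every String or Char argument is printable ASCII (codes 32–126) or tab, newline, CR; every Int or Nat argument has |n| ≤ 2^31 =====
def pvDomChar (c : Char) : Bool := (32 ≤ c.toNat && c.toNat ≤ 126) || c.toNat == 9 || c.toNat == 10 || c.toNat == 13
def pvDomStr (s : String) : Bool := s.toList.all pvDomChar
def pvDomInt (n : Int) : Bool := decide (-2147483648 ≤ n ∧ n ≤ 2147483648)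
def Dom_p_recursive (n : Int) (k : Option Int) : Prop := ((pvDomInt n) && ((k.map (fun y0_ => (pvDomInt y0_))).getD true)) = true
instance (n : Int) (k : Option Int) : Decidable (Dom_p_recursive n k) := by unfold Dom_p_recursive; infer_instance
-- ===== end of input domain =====

-- B replaces A's binary-splitting recursion by its closed form (normalized k, or 1 when that is ≤ 1).

-- ===== PORT A =====
-- A's `if not k or k > n: k = n` (Python: k falsy = None or 0)
def pvNormK (n : Int) (k : Option Int) : Int :=
  match k with
  | none => n
  | some v => if v = 0 ∨ v > n then n else v

theorem pvNormK_le (n : Int) (k : Option Int) : pvNormK n k ≤ n := by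
  cases k with
  | none => simp [pvNormK]
  | some v => simp only [pvNormK]; split_ifs <;> omega

theorem pvNormK_some (n m : Int) (h1 : 1 ≤ m) (h2 : m ≤ n) : pvNormK n (some m) = m := by
  simp only [pvNormK]; split_ifs <;> omega

-- literal port of A's recursion; the assert is covered by Pre_p_recursive below
def p_recursive (n : Int) (k : Option Int) : Int :=
  if pvNormK n k ≤ 1 then 1
  else if n ≤ 1 then n
  else
    p_recursive n (some (PySem.Int.floordiv (pvNormK n k) 2)) +
      p_recursive (n - PySem.Int.floordiv (pvNormK n k) 2)
        (some (pvNormK n k - PySem.Int.floordiv (pvNormK n k) 2))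
termination_by (pvNormK n k).toNat
decreasing_by
  all_goals
    rename_i h1 h2
    have hle := pvNormK_le n k
    rw [PySem.Int.floordiv_eq_ediv_of_pos (by omega : (0:Int) < 2),
        pvNormK_some _ _ (by omega) (by omega)]
    omega

-- ===== PORT B =====
def p_recursive_alt (n : Int) (k : Option Int) : Int :=
  let kk := pvNormK n k
  if kk ≤ 1 then 1 else kk

-- ===== PRECONDITION & SPEC =====
-- Pre_ excludes exactly the inputs where A's assert fails (AssertionError): n < 0, or a given nonzero k < 0.
def Pre_p_recursive (n : Int) (k : Option Int) : Prop :=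
  0 ≤ n ∧ 0 ≤ k.getD 0
instance (n : Int) (k : Option Int) : Decidable (Pre_p_recursive n k) := by
  unfold Pre_p_recursive; infer_instance
def pvWitness_p_recursive : Int × Option Int := (10, some 4)

def Spec_p_recursive (n : Int) (k : Option Int) (out : Int) : Prop := out = p_recursive_alt n k
instance (n : Int) (k : Option Int) (out : Int) : Decidable (Spec_p_recursive n k out) := by
  unfold Spec_p_recursive; infer_instance

-- ===== CLAIM (what is proved, stated in full; the proofs are below) =====
def Claim_equal_p_recursive : Prop := ∀ (n : Int) (k : Option Int), Dom_p_recursive n k → Pre_p_recursive n k → Spec_p_recursive n k (p_recursive n k)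

-- ===== LEMMAS AND PROOFS =====

-- core invariant: on 1 ≤ m ≤ n the recursion returns exactly m
theorem p_recursive_some_eq (c : Nat) : ∀ (n m : Int), m.toNat ≤ c → 1 ≤ m → m ≤ n →
    p_recursive n (some m) = m := by
  induction c with
  | zero => intro n m hc h1 _; omega
  | succ c ih =>
    intro n m hc h1 h2
    rw [p_recursive, pvNormK_some n m h1 h2]
    by_cases hle : m ≤ 1
    · simp [show m = 1 by omega]
    · rw [if_neg hle, if_neg (by omega : ¬ n ≤ 1),
          PySem.Int.floordiv_eq_ediv_of_pos (by omega : (0:Int) < 2)]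
      rw [ih n (m / 2) (by omega) (by omega) (by omega),
          ih (n - m / 2) (m - m / 2) (by omega) (by omega) (by omega)]
      omega

theorem p_recursive_eq_alt (n : Int) (k : Option Int)
    (hp : Pre_p_recursive n k) : p_recursive n k = p_recursive_alt n k := by
  obtain ⟨hn, hk⟩ := hp
  have hkv : pvNormK n k ≤ 1 ∨ (1 ≤ pvNormK n k ∧ pvNormK n k ≤ n) := by
    cases k with
    | none => simp only [pvNormK]; omega
    | some v =>
      simp only [Option.getD_some] at hk
      simp only [pvNormK]; split_ifs <;> omega
  have halt : p_recursive_alt n k = if pvNormK n k ≤ 1 then 1 else pvNormK n k := rfl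
  rw [p_recursive, halt]
  rcases hkv with h | ⟨h1, h2⟩
  · rw [if_pos h, if_pos h]
  · by_cases hle : pvNormK n k ≤ 1
    · rw [if_pos hle, if_pos hle]
    · rw [if_neg hle, if_neg hle, if_neg (by omega : ¬ n ≤ 1),
          PySem.Int.floordiv_eq_ediv_of_pos (by omega : (0:Int) < 2)]
      rw [p_recursive_some_eq (pvNormK n k / 2).toNat n _ le_rfl (by omega) (by omega),
          p_recursive_some_eq (pvNormK n k - pvNormK n k / 2).toNat _ _ le_rfl
            (by omega) (by omega)]
      omega

-- ===== VERDICT (by name: the statement is the Claim_ definition above) =====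
theorem p_recursive_spec : Claim_equal_p_recursive :=
  fun n k _ hp => p_recursive_eq_alt n k hp
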